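-- pv_equiv track=rewrite | github.com/abhilekh18/dataChatAgent | intake/catalog.py | _semantic_name_candidates
-- ===== SOURCE A (Python) =====
-- from typing import Dict, Iterable, Iterator, Mapping, Optional, Tuple
--
-- def _semantic_name_candidates(dataset_name: str) -> Tuple[str, ...]:
--     """Return possible semantic keys for a dataset name with suffixes.
--
--     Examples
--     --------
--     >>> _semantic_name_candidates("subscriptions_20250101")
--     ('subscriptions_20250101', 'subscriptions')
--     """
--     segments = dataset_name.split("_")
--     candidates: list[str] = []
--     for length in range(len(segments), 0, -1):
--         candidate = "_".join(segments[:length])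
--         if candidate and candidate not in candidates:
--             candidates.append(candidate)
--     return tuple(candidates)
-- ===== SOURCE B (Python) =====
-- def _semantic_name_candidates(dataset_name: str):
--     """Trim the name at its last underscore repeatedly, collecting the non-empty stages."""
--     out = []
--     s = dataset_name
--     while True:
--         if s:
--             out.append(s)
--         idx = s.rfind("_")
--         if idx == -1:
--             break
--         s = s[:idx]
--     return tuple(out)
-- ===== Notes on version B (the rewrite author's own statement) =====
-- stated objective: simpler
-- what changed: Replaces split-into-segments plus join-of-every-prefix-length (with a dead dedup membership check) by a single right-to-left trimming loop that repeatedly cuts the string at its last underscore via rfind, appending each non-empty stage.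
import Mathlib
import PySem

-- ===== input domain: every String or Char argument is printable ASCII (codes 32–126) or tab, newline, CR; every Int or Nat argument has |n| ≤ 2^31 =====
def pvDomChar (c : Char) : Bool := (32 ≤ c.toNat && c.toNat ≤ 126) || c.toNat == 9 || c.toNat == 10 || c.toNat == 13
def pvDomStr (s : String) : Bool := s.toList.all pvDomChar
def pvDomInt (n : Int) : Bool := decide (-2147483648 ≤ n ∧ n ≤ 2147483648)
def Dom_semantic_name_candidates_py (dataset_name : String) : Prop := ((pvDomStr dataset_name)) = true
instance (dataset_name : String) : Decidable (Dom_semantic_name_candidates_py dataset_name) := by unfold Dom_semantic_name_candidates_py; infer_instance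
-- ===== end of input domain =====

-- B is a simpler right-to-left trimming loop (rfind + slice) instead of A's split/join over all prefix lengths; equal output proved for all strings.

-- ===== PORT A =====
-- segments = dataset_name.split("_"); for length in range(len(segments), 0, -1): candidate = "_".join(segments[:length]); if candidate and candidate not in candidates: append
def semantic_name_candidates_py (dataset_name : String) : List String :=
  match PySem.Str.split? dataset_name "_" with
  | none => []   -- unreachable: the separator "_" is non-empty
  | some segments =>
    (PySem.List.pyRange (segments.length : Int) 0 (-1)).foldl
      (fun candidates length =>
        let candidate := PySem.Str.join "_" (PySem.List.slice segments none (some length))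
        if candidate ≠ "" ∧ candidate ∉ candidates then candidates ++ [candidate] else candidates)
      []

-- ===== PORT B =====
-- the while-loop of Source B: s shrinks strictly (s = s[:idx] with idx = s.rfind("_") < len(s)), so it is structural recursion on the char list
theorem pv_rfind_lt_length (cs : List Char) (h : PySem.Chars.rfind cs ['_'] ≠ -1) :
    (PySem.Chars.rfind cs ['_']).toNat < cs.length := by
  have key : ∀ k, PySem.Chars.rfind.go cs ['_'] k ≠ -1 →
      (PySem.Chars.rfind.go cs ['_'] k).toNat < cs.length := by
    intro k
    induction k with
    | zero =>
      intro hk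
      simp only [PySem.Chars.rfind.go] at hk ⊢
      split_ifs at hk ⊢ with hpre
      · have : cs ≠ [] := by
          intro hnil; subst hnil; simp [List.isPrefixOf] at hpre
        simpa using List.length_pos_of_ne_nil this
      · simp at hk
    | succ j ih =>
      intro hk
      simp only [PySem.Chars.rfind.go] at hk ⊢
      split_ifs at hk ⊢ with hpre
      · have hlt : j + 1 < cs.length := by
          by_contra hge
          rw [List.drop_eq_nil_of_le (by omega)] at hpre
          simp [List.isPrefixOf] at hpre
        simpa using hlt
      · exact ih hk
  exact key cs.length h

def pvAltGo (cs : List Char) : List String :=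
  let here := if cs.isEmpty then [] else [String.ofList cs]
  let idx := PySem.Chars.rfind cs ['_']
  if h : idx = -1 then here
  else here ++ pvAltGo (cs.take idx.toNat)
termination_by cs.length
decreasing_by
  have := pv_rfind_lt_length cs h
  simp only [List.length_take]
  omega

def semantic_name_candidates_py_alt (dataset_name : String) : List String :=
  pvAltGo dataset_name.toList

-- ===== PRECONDITION & SPEC =====
def Spec_semantic_name_candidates_py (dataset_name : String) (out : List String) : Prop := out = semantic_name_candidates_py_alt dataset_name
instance (dataset_name : String) (out : List String) : Decidable (Spec_semantic_name_candidates_py dataset_name out) := by unfold Spec_semantic_name_candidates_py; infer_instance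

-- ===== CLAIM (what is proved, stated in full; the proofs are below) =====
def Claim_equal_semantic_name_candidates_py : Prop := ∀ (dataset_name : String), Dom_semantic_name_candidates_py dataset_name → Spec_semantic_name_candidates_py dataset_name (semantic_name_candidates_py dataset_name)

-- ===== LEMMAS AND PROOFS =====

-- the common reference function: candidates from a segment list, longest prefix first
def pvG : List (List Char) → List String
  | [] => []
  | a :: rest =>
    (let c := List.intercalate ['_'] (a :: rest)
     if c = [] then [] else [String.ofList c]) ++ pvG (a :: rest).dropLast
termination_by segs => segs.length
decreasing_by simp only [List.length_dropLast, List.length_cons]; omega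


-- intercalate basics
theorem pv_intercalate_singleton (a : List Char) : List.intercalate ['_'] [a] = a := by
  simp [List.intercalate]

theorem pv_intercalate_cons_cons (a b : List Char) (t : List (List Char)) :
    List.intercalate ['_'] (a :: b :: t) = a ++ '_' :: List.intercalate ['_'] (b :: t) := by
  simp [List.intercalate, List.intersperse]

theorem pv_intercalate_concat (xs : List (List Char)) (y : List Char) (hxs : xs ≠ []) :
    List.intercalate ['_'] (xs ++ [y]) = List.intercalate ['_'] xs ++ '_' :: y := by
  induction xs with
  | nil => simp at hxs
  | cons a t ih =>
    cases t with
    | nil => simp [pv_intercalate_cons_cons, pv_intercalate_singleton]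
    | cons b t' =>
      rw [List.cons_append, List.cons_append, pv_intercalate_cons_cons,
        ← List.cons_append, ih (by simp), pv_intercalate_cons_cons]
      simp

-- PySem.Chars.splitOn on separator "_" is Mathlib's splitOnP (· == '_')
theorem pv_go_eq (fuel : Nat) : ∀ (l cur : List Char) (acc : List (List Char)), l.length ≤ fuel →
    PySem.Chars.splitOn.go ['_'] fuel l cur acc
      = acc.reverse ++ (List.splitOnP (· == '_') l).modifyHead (fun h => cur.reverse ++ h) := by
  induction fuel with
  | zero =>
    intro l cur acc h
    have hl : l = [] := List.eq_nil_of_length_eq_zero (by omega)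
    subst hl
    simp [PySem.Chars.splitOn.go, List.splitOnP_nil]
  | succ fuel ih =>
    intro l cur acc h
    cases l with
    | nil => simp [PySem.Chars.splitOn.go, List.splitOnP_nil]
    | cons c rest =>
      simp only [PySem.Chars.splitOn.go]
      by_cases hc : c = '_'
      · subst hc
        have hpre : List.isPrefixOf ['_'] ('_' :: rest) = true := by simp [List.isPrefixOf]
        rw [if_pos hpre]
        have := ih rest [] (cur.reverse :: acc) (by simpa using Nat.le_of_succ_le_succ h)
        simp only [List.drop_succ_cons, List.length_singleton, List.drop_zero] at this ⊢
        rw [this]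
        rw [List.splitOnP_cons]
        simp only [if_pos (by simp : ('_' == '_') = true)]
        cases hsp : List.splitOnP (fun x => x == '_') rest <;> simp
      · have hpre : List.isPrefixOf ['_'] (c :: rest) = false := by
          have : List.isPrefixOf ['_'] (c :: rest)
              = ('_' == c && List.isPrefixOf ([] : List Char) rest) := rfl
          rw [this]
          simp
          exact fun hh => (hc hh.symm).elim
        rw [if_neg (by simp [hpre])]
        have := ih rest (c :: cur) acc (by simpa using Nat.le_of_succ_le_succ h)
        rw [this, List.splitOnP_cons]
        have hne : List.splitOnP (fun x => x == '_') rest ≠ [] := List.splitOnP_ne_nil _ rest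
        obtain ⟨hd, tl, hht⟩ := List.exists_cons_of_ne_nil hne
        rw [if_neg (by simp [hc]), hht]
        simp

theorem pv_splitOn_eq (cs : List Char) :
    PySem.Chars.splitOn cs ['_'] = List.splitOnP (· == '_') cs := by
  unfold PySem.Chars.splitOn
  rw [pv_go_eq (cs.length + 1) cs [] [] (by omega)]
  have hne := List.splitOnP_ne_nil (fun x => x == '_') cs
  obtain ⟨hd, tl, hht⟩ := List.exists_cons_of_ne_nil hne
  rw [hht]
  simp

-- splitting at the LAST separator
theorem pv_split_last (a b : List Char) (hb : '_' ∉ b) :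
    List.splitOnP (· == '_') (a ++ '_' :: b) = List.splitOnP (· == '_') a ++ [b] := by
  induction a with
  | nil =>
    rw [List.nil_append, List.splitOnP_cons, if_pos (by simp),
      List.splitOnP_eq_single _ _ (by intro x hx; simp; exact fun h => hb (h ▸ hx)),
      List.splitOnP_nil]
    rfl
  | cons c t ih =>
    rw [List.cons_append, List.splitOnP_cons, List.splitOnP_cons]
    by_cases hc : c = '_'
    · rw [if_pos (by simp [hc]), if_pos (by simp [hc]), ih]
      rfl
    · rw [if_neg (by simp [hc]), if_neg (by simp [hc]), ih]
      have hne := List.splitOnP_ne_nil (fun x => x == '_') t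
      obtain ⟨hd, tl, hht⟩ := List.exists_cons_of_ne_nil hne
      rw [hht]
      simp

-- rfind on "_" : characterisation
theorem pv_isPrefix_iff (xs : List Char) :
    List.isPrefixOf ['_'] xs = true ↔ xs.head? = some '_' := by
  cases xs with
  | nil => simp [List.isPrefixOf]
  | cons c t =>
    have h1 : List.isPrefixOf ['_'] (c :: t)
        = ('_' == c && List.isPrefixOf ([] : List Char) t) := rfl
    have h2 : List.isPrefixOf ([] : List Char) t = true := rfl
    rw [h1, h2]
    simp only [Bool.and_true, beq_iff_eq, List.head?_cons, Option.some.injEq]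
    exact eq_comm

theorem pv_isPrefix_drop_iff (cs : List Char) (j : Nat) :
    List.isPrefixOf ['_'] (cs.drop j) = true ↔ cs[j]? = some '_' := by
  rw [pv_isPrefix_iff, List.head?_drop]

theorem pv_rfind_go_spec (cs : List Char) (k : Nat) :
    (PySem.Chars.rfind.go cs ['_'] k = -1 ∧ ∀ j ≤ k, ¬ (cs[j]? = some '_'))
    ∨ (∃ j : Nat, PySem.Chars.rfind.go cs ['_'] k = j ∧ j ≤ k ∧ cs[j]? = some '_'
        ∧ ∀ i, j < i → i ≤ k → ¬ (cs[i]? = some '_')) := by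
  induction k with
  | zero =>
    by_cases hp : List.isPrefixOf ['_'] cs = true
    · right
      refine ⟨0, ?_, le_refl 0, ?_, by omega⟩
      · simp only [PySem.Chars.rfind.go, if_pos hp]; rfl
      · have := (pv_isPrefix_drop_iff cs 0).mp (by simpa using hp)
        simpa using this
    · left
      constructor
      · simp only [PySem.Chars.rfind.go, if_neg hp]
      · intro j hj
        interval_cases j
        exact fun hh => hp ((pv_isPrefix_drop_iff cs 0).mpr (by simpa using hh))
  | succ k ih =>
    by_cases hp : List.isPrefixOf ['_'] (cs.drop (k + 1)) = true
    · right
      refine ⟨k + 1, ?_, le_refl _, (pv_isPrefix_drop_iff cs (k + 1)).mp hp, by omega⟩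
      simp only [PySem.Chars.rfind.go, if_pos hp]
    · have hgo : PySem.Chars.rfind.go cs ['_'] (k + 1) = PySem.Chars.rfind.go cs ['_'] k := by
        simp only [PySem.Chars.rfind.go, if_neg hp]
      have hnk : ¬ (cs[k + 1]? = some '_') :=
        fun hh => hp ((pv_isPrefix_drop_iff cs (k + 1)).mpr hh)
      rcases ih with ⟨h1, h2⟩ | ⟨j, h1, h2, h3, h4⟩
      · left
        refine ⟨hgo ▸ h1, ?_⟩
        intro j hj
        rcases Nat.lt_or_ge j (k + 1) with hlt | hge
        · exact h2 j (by omega)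
        · have : j = k + 1 := by omega
          subst this
          exact hnk
      · right
        refine ⟨j, hgo ▸ h1, by omega, h3, ?_⟩
        intro i hji hik
        rcases Nat.lt_or_ge i (k + 1) with hlt | hge
        · exact h4 i hji (by omega)
        · have : i = k + 1 := by omega
          subst this
          exact hnk

theorem pv_mem_getElem (cs : List Char) (h : '_' ∈ cs) :
    ∃ j, j < cs.length ∧ cs[j]? = some '_' := by
  obtain ⟨j, hj, hget⟩ := List.mem_iff_getElem.mp h
  exact ⟨j, hj, by simp [hj, hget]⟩

theorem pv_rfind_neg (cs : List Char) (h : PySem.Chars.rfind cs ['_'] = -1) : '_' ∉ cs := by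
  intro hmem
  obtain ⟨j, hj, hh⟩ := pv_mem_getElem cs hmem
  rcases pv_rfind_go_spec cs cs.length with ⟨_, h2⟩ | ⟨i, h1, _, _, _⟩
  · exact h2 j (by omega) hh
  · rw [PySem.Chars.rfind] at h; rw [h1] at h; omega

theorem pv_rfind_pos (cs : List Char) (h : PySem.Chars.rfind cs ['_'] ≠ -1) :
    ∃ j : Nat, PySem.Chars.rfind cs ['_'] = j ∧ j < cs.length
      ∧ cs = cs.take j ++ '_' :: cs.drop (j + 1) ∧ '_' ∉ cs.drop (j + 1) := by
  rcases pv_rfind_go_spec cs cs.length with ⟨h1, _⟩ | ⟨j, h1, _, h3, h4⟩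
  · exact absurd (by rw [PySem.Chars.rfind]; exact h1) h
  · have hjlt : j < cs.length := by
      by_contra hge
      rw [List.getElem?_eq_none (by omega)] at h3
      simp at h3
    refine ⟨j, by rw [PySem.Chars.rfind]; exact h1, hjlt, ?_, ?_⟩
    · have hdj : cs.drop j = '_' :: cs.drop (j + 1) := by
        rw [List.drop_eq_getElem_cons hjlt]
        have : cs[j] = '_' := by
          have := h3
          rw [List.getElem?_eq_getElem hjlt] at this
          simpa using this
        rw [this]
      conv_lhs => rw [← List.take_append_drop j cs, hdj]
    · intro hmem
      obtain ⟨m, hm, hh⟩ := pv_mem_getElem (cs.drop (j + 1)) hmem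
      rw [List.getElem?_drop] at hh
      have hlen : (cs.drop (j + 1)).length = cs.length - (j + 1) := by simp
      exact h4 (j + 1 + m) (by omega) (by omega) hh

-- B equals the reference pvG on the splitOnP segments
theorem pv_altGo_eq (cs : List Char) : pvAltGo cs = pvG (List.splitOnP (· == '_') cs) := by
  by_cases h : PySem.Chars.rfind cs ['_'] = -1
  · have hnm : '_' ∉ cs := pv_rfind_neg cs h
    rw [pvAltGo, dif_pos h]
    rw [List.splitOnP_eq_single _ _ (by intro x hx; simp; exact fun hxe => hnm (hxe ▸ hx))]
    rw [pvG]
    have hdl : ([cs] : List (List Char)).dropLast = [] := rfl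
    simp only [pv_intercalate_singleton, hdl]
    cases cs <;> simp [pvG]
  · obtain ⟨j, hj, hjlt, hsplit, hnm⟩ := pv_rfind_pos cs h
    rw [pvAltGo, dif_neg h]
    have hcs_ne : cs ≠ [] := by intro hn; rw [hn] at hjlt; simp at hjlt
    have hsp : List.splitOnP (· == '_') cs
        = List.splitOnP (· == '_') (cs.take j) ++ [cs.drop (j + 1)] := by
      conv_lhs => rw [hsplit]
      exact pv_split_last _ _ hnm
    have hne := List.splitOnP_ne_nil (fun x => x == '_') (cs.take j)
    obtain ⟨hd, tl, hht⟩ := List.exists_cons_of_ne_nil hne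
    have hinter : List.intercalate ['_'] (List.splitOnP (· == '_') cs) = cs := by
      have := List.intercalate_splitOn cs '_'
      simpa [List.splitOn] using this
    have hih : pvAltGo (cs.take j) = pvG (List.splitOnP (· == '_') (cs.take j)) :=
      pv_altGo_eq (cs.take j)
    have hGr : pvG (List.splitOnP (· == '_') cs)
        = [String.ofList cs] ++ pvG (List.splitOnP (· == '_') (cs.take j)) := by
      rw [hsp, hht, List.cons_append, pvG]
      have h1 : List.intercalate ['_'] (hd :: (tl ++ [cs.drop (j + 1)])) = cs := by
        rw [← List.cons_append, ← hht, ← hsp]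
        exact hinter
      have h2 : (hd :: (tl ++ [cs.drop (j + 1)])).dropLast = hd :: tl := by
        rw [← List.cons_append]
        exact List.dropLast_concat
      simp only [h1, h2, if_neg hcs_ne, ← hht]
    rw [hGr]
    have hjn : (PySem.Chars.rfind cs ['_']).toNat = j := by rw [hj]; simp
    rw [hjn, hih]
    simp [hcs_ne]
termination_by cs.length
decreasing_by simp [List.length_take]; omega


-- A side: the descending range, and the fold over prefix lengths
theorem pv_pyRange_neg (n : Nat) :
    PySem.List.pyRange (n : Int) 0 (-1) = (List.range n).map (fun k => (n : Int) - (k : Nat)) := by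
  unfold PySem.List.pyRange
  rw [if_neg (by norm_num)]
  have hcount : (if 0 < (-1 : Int) then (if (n : Int) < 0 then (((0 : Int) - n + -1 - 1) / -1).toNat else 0)
      else if (0 : Int) < n then (((n : Int) - 0 + -(-1) - 1) / -(-1)).toNat else 0) = n := by
    rw [if_neg (by norm_num)]
    by_cases hn : (0 : Int) < n
    · rw [if_pos hn]; norm_num
    · rw [if_neg hn]; omega
  simp only [hcount]
  apply List.map_congr_left
  intro k _
  push_cast
  ring

theorem pv_range_map_succ (n : Nat) :
    (List.range (n + 1)).map (fun k => (((n : Nat) + 1 : Nat) : Int) - (k : Nat))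
      = (((n + 1 : Nat)) : Int) :: (List.range n).map (fun k => ((n : Nat) : Int) - (k : Nat)) := by
  rw [List.range_succ_eq_map, List.map_cons, List.map_map]
  refine congrArg₂ _ (by push_cast; ring) ?_
  apply List.map_congr_left
  intro k _
  simp only [Function.comp_apply]
  push_cast
  ring

theorem pv_intercalate_take_succ (segsC : List (List Char)) (n : Nat) (h : n + 1 ≤ segsC.length) :
    (List.intercalate ['_'] (segsC.take n)).length
      ≤ (List.intercalate ['_'] (segsC.take (n + 1))).length ∧
    (1 ≤ n → (List.intercalate ['_'] (segsC.take n)).length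
      < (List.intercalate ['_'] (segsC.take (n + 1))).length) := by
  have hx : segsC.take (n + 1) = segsC.take n ++ [segsC[n]] := by
    rw [List.take_succ, List.getElem?_eq_getElem (by omega)]
    rfl
  by_cases hn : 1 ≤ n
  · have hne : segsC.take n ≠ [] := by
      intro hnil
      have hl := congrArg List.length hnil
      rw [List.length_take] at hl
      simp only [List.length_nil] at hl
      omega
    rw [hx, pv_intercalate_concat _ _ hne]
    constructor
    · simp
    · intro _; simp
  · have hn0 : n = 0 := by omega
    subst hn0
    have h0 : List.intercalate ['_'] (segsC.take 0) = [] := by simp [List.intercalate]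
    rw [h0]
    simp

theorem pv_pvG_take_succ (segsC : List (List Char)) (n : Nat) (h : n + 1 ≤ segsC.length) :
    pvG (segsC.take (n + 1))
      = (if List.intercalate ['_'] (segsC.take (n + 1)) = [] then []
         else [String.ofList (List.intercalate ['_'] (segsC.take (n + 1)))]) ++ pvG (segsC.take n) := by
  have hx : segsC.take (n + 1) = segsC.take n ++ [segsC[n]] := by
    rw [List.take_succ, List.getElem?_eq_getElem (by omega)]
    rfl
  obtain ⟨a, t, hat⟩ : ∃ a t, segsC.take (n + 1) = a :: t :=
    List.exists_cons_of_ne_nil (by rw [hx]; exact List.append_ne_nil_of_right_ne_nil _ (by simp))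
  rw [hat, pvG]
  have hdl : (a :: t).dropLast = segsC.take n := by
    rw [← hat, hx, List.dropLast_concat]
  rw [hdl, ← hat]

theorem pv_fold (segs : List String) :
    ∀ (n : Nat), n ≤ segs.length → ∀ acc : List String,
      (∀ x ∈ acc, (List.intercalate ['_'] ((segs.map String.toList).take n)).length < x.toList.length) →
      List.foldl
        (fun candidates length =>
          let candidate := PySem.Str.join "_" (PySem.List.slice segs none (some length))
          if candidate ≠ "" ∧ candidate ∉ candidates then candidates ++ [candidate] else candidates)
        acc ((List.range n).map (fun k => (n : Int) - (k : Nat)))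
      = acc ++ pvG ((segs.map String.toList).take n) := by
  intro n
  induction n with
  | zero =>
    intro _ acc _
    simp [pvG]
  | succ n ih =>
    intro hle acc hinv
    rw [pv_range_map_succ, List.foldl_cons]
    have hslice : PySem.List.slice segs none (some ((n + 1 : Nat) : Int)) = segs.take (n + 1) :=
      PySem.List.slice_to_natCast segs (n + 1)
    set cand := PySem.Str.join "_" (PySem.List.slice segs none (some ((n + 1 : Nat) : Int))) with hcand
    have hct : cand.toList = List.intercalate ['_'] ((segs.map String.toList).take (n + 1)) := by
      rw [hcand, PySem.Str.toList_join, hslice]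
      have : (segs.take (n + 1)).map String.toList = (segs.map String.toList).take (n + 1) :=
        List.map_take ..
      rw [PySem.Chars.join, this]
      rfl
    have hLmap : n + 1 ≤ (segs.map String.toList).length := by simpa using hle
    have hmono := pv_intercalate_take_succ (segs.map String.toList) n hLmap
    have hnotmem : cand ∉ acc := by
      intro hmem
      have := hinv cand hmem
      rw [hct] at this
      omega
    rw [pv_pvG_take_succ _ _ hLmap]
    by_cases hne : cand = ""
    · have hnil : List.intercalate ['_'] ((segs.map String.toList).take (n + 1)) = [] := by
        rw [← hct, hne]; rfl
      rw [if_neg (by simp [hne]), if_pos hnil, List.nil_append]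
      rw [ih (by omega) acc ?_]
      intro x hx
      have := hinv x hx
      have h0 : (List.intercalate ['_'] ((segs.map String.toList).take n)).length
          ≤ (List.intercalate ['_'] ((segs.map String.toList).take (n + 1))).length := hmono.1
      omega
    · have hnil : List.intercalate ['_'] ((segs.map String.toList).take (n + 1)) ≠ [] := by
        rw [← hct]
        simpa [String.toList_eq_nil_iff] using hne
      rw [if_pos ⟨hne, hnotmem⟩, if_neg hnil]
      have hof : String.ofList (List.intercalate ['_'] ((segs.map String.toList).take (n + 1))) = cand := by
        rw [← hct, String.ofList_toList]
      rw [hof]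
      rw [ih (by omega) (acc ++ [cand]) ?_]
      · simp
      · intro x hx
        rcases List.mem_append.mp hx with hx | hx
        · have := hinv x hx
          have h0 := hmono.1
          omega
        · have hxc : x = cand := by simpa using hx
          subst hxc
          rw [hct]
          by_cases hn1 : 1 ≤ n
          · exact hmono.2 hn1
          · have : n = 0 := by omega
            subst this
            have h0 : List.intercalate ['_'] ((segs.map String.toList).take 0) = [] := by
              simp [List.intercalate]
            rw [h0]
            have := List.length_pos_iff.mpr hnil
            simpa using this

theorem pv_split_some (s : String) :
    ∃ segs, PySem.Str.split? s "_" = some segs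
      ∧ segs.map String.toList = List.splitOnP (· == '_') s.toList := by
  have hb := PySem.Str.split?_map s "_"
  have hu : ("_" : String).toList = ['_'] := by decide
  rw [hu, PySem.Chars.split?, if_neg (by simp)] at hb
  cases hx : PySem.Str.split? s "_" with
  | none => rw [hx] at hb; simp at hb
  | some segs =>
    rw [hx] at hb
    simp only [Option.map_some, Option.some.injEq] at hb
    exact ⟨segs, rfl, by rw [hb, pv_splitOn_eq]⟩

theorem pv_A_eq (s : String) :
    semantic_name_candidates_py s = pvG (List.splitOnP (· == '_') s.toList) := by
  obtain ⟨segs, hsegs, hmap⟩ := pv_split_some s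
  unfold semantic_name_candidates_py
  split
  next heq => rw [hsegs] at heq; cases heq
  next segments heq =>
  rw [hsegs] at heq
  obtain rfl : segs = segments := by cases heq; rfl
  rw [pv_pyRange_neg segs.length]
  rw [pv_fold segs segs.length (le_refl _) [] (by simp)]
  rw [List.nil_append]
  have : (segs.map String.toList).take segs.length = segs.map String.toList := by
    apply List.take_of_length_le
    simp
  rw [this, hmap]

theorem semantic_name_candidates_py_spec : Claim_equal_semantic_name_candidates_py := by
  intro s _
  unfold Spec_semantic_name_candidates_py semantic_name_candidates_py_alt
  rw [pv_A_eq, pv_altGo_eq]
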